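-- pv_equiv track=rewrite | github.com/adi037raj/CSP-problem | WordokuSolver_minconflict.py | isValidWordku
-- ===== SOURCE A (Python) =====
-- def isValidWordku(puzzle):   #to check whether the generated worduku is valid or not
--
--         # Check rows
--         for i in range(9):
--             d = {}  # taking it as a set and finding whetehr all contraints are satisfied or not
--             for j in range(9):
--                 if puzzle[i][j] == '.': #if its space or something
--                     pass
--                 elif puzzle[i][j] in d:
--                     return False
--                 else:
--                     d[puzzle[i][j]] = True
--         # Check columns
--         for j in range(9):  #doing the same with the every columns
--             d = {}
--             for i in range(9):
--                 if puzzle[i][j] == '.':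
--                     pass
--                 elif puzzle[i][j] in d:
--                     return False
--                 else:
--                     d[puzzle[i][j]] = True
--         # Check sub-boxes
--         for m in range(0, 9, 3):  # Now checking the grids and finding whether the wordku is valid or not
--             for n in range(0, 9, 3):
--                 d = {}
--                 for i in range(n, n + 3):
--                     for j in range(m, m + 3):
--                         if puzzle[i][j] == '.':
--                             pass
--                         elif puzzle[i][j] in d:
--                             return False
--                         else:
--                             d[puzzle[i][j]] = True
--         return True
-- ===== SOURCE B (Python) =====
-- def isValidWordku(puzzle):
--     # single pass over the 81 cells maintaining 27 unit sets (9 rows, 9 cols, 9 boxes)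
--     rows = [set() for _ in range(9)]
--     cols = [set() for _ in range(9)]
--     boxes = [set() for _ in range(9)]
--     for i in range(9):
--         for j in range(9):
--             c = puzzle[i][j]
--             if c == '.':
--                 continue
--             b = i // 3 * 3 + j // 3
--             if c in rows[i] or c in cols[j] or c in boxes[b]:
--                 return False
--             rows[i].add(c)
--             cols[j].add(c)
--             boxes[b].add(c)
--     return True
-- ===== Notes on version B (the rewrite author's own statement) =====
-- stated objective: alternative
-- what changed: A's three separate nested loop nests (rows pass, columns pass, then boxes pass, each rescanning the grid with a fresh seen-dict) are replaced by a single row-major pass over the 81 cells that maintains 27 unit sets (9 rows, 9 columns, 9 boxes) and rejects on the first repeated non-'.' entry.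
import Mathlib
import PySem

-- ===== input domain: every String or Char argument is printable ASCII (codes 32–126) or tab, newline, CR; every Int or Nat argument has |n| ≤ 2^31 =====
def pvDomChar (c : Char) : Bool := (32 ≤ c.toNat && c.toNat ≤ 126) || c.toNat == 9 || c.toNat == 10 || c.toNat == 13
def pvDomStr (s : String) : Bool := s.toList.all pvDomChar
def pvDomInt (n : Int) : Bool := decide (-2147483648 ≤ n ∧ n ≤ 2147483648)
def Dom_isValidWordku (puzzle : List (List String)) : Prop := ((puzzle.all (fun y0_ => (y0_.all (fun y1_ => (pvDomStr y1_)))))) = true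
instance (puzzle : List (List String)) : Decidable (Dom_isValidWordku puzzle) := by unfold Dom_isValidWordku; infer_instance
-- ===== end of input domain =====

-- B replaces A's three separate nested dict-scan passes (rows, then columns, then boxes) by a
-- single pass over the 81 cells maintaining 27 unit sets (objective: alternative decomposition).

-- shared indexing helper: puzzle[i][j]; the "" / [] defaults are unreachable on the cells the
-- Pythons actually read before returning on inputs satisfying Pre_
def cellAt (puzzle : List (List String)) (i j : Int) : String :=
  PySem.List.pyGetD (PySem.List.pyGetD puzzle i []) j ""

-- ===== PORT A =====
-- one group scan with a dict, early-False on a repeated non-'.' entry (A's inner loops)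
def scanA : List String → PySem.Dict String Bool → Bool
  | [], _ => true
  | x :: xs, d =>
    if x == "." then scanA xs d
    else if d.contains x then false
    else scanA xs (d.insert x true)

def isValidWordku (puzzle : List (List String)) : Bool :=
  ((PySem.List.pyRange 0 9 1).all (fun i =>
      scanA ((PySem.List.pyRange 0 9 1).map (fun j => cellAt puzzle i j)) PySem.Dict.empty))
  &&
  ((PySem.List.pyRange 0 9 1).all (fun j =>
      scanA ((PySem.List.pyRange 0 9 1).map (fun i => cellAt puzzle i j)) PySem.Dict.empty))
  &&
  ((PySem.List.pyRange 0 9 3).all (fun m =>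
      (PySem.List.pyRange 0 9 3).all (fun n =>
        scanA ((PySem.List.pyRange n (n + 3) 1).flatMap (fun i =>
          (PySem.List.pyRange m (m + 3) 1).map (fun j => cellAt puzzle i j))) PySem.Dict.empty)))

-- ===== PORT B =====
-- Source B's three Python lists of 9 sets are ported as index-to-set maps (exact: the loop only
-- ever indexes them at 0..8); the nested 'for i/for j' with early return is the structural
-- recursion over the row-major cell list, carrying the same three tables.
def loopB (puzzle : List (List String)) :
    List (Int × Int) → (Int → PySem.Set String) → (Int → PySem.Set String) →
    (Int → PySem.Set String) → Bool
  | [], _, _, _ => true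
  | (i, j) :: cs, rows, cols, boxes =>
    if cellAt puzzle i j == "." then loopB puzzle cs rows cols boxes
    else if PySem.Set.contains (rows i) (cellAt puzzle i j)
        || PySem.Set.contains (cols j) (cellAt puzzle i j)
        || PySem.Set.contains (boxes (PySem.Int.floordiv i 3 * 3 + PySem.Int.floordiv j 3)) (cellAt puzzle i j) then
      false
    else
      loopB puzzle cs
        (fun k => if k = i then PySem.Set.add (rows i) (cellAt puzzle i j) else rows k)
        (fun k => if k = j then PySem.Set.add (cols j) (cellAt puzzle i j) else cols k)
        (fun k => if k = PySem.Int.floordiv i 3 * 3 + PySem.Int.floordiv j 3 then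
            PySem.Set.add (boxes (PySem.Int.floordiv i 3 * 3 + PySem.Int.floordiv j 3)) (cellAt puzzle i j)
          else boxes k)

def cells81 : List (Int × Int) :=
  (PySem.List.pyRange 0 9 1).flatMap (fun i => (PySem.List.pyRange 0 9 1).map (fun j => (i, j)))

def isValidWordku_alt (puzzle : List (List String)) : Bool :=
  loopB puzzle cells81 (fun _ => PySem.Set.empty) (fun _ => PySem.Set.empty) (fun _ => PySem.Set.empty)

-- ===== PRECONDITION & SPEC =====
-- Pre_ is exactly where A returns: either the first 9 rows form a full 9x9 grid, or the grid is
-- too small but some row holds a duplicate non-'.' entry that A's row-major row scan reaches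
-- before its first out-of-range access (A returns False there; on all other short grids A
-- raises IndexError).
def Pre_isValidWordku (puzzle : List (List String)) : Prop :=
  (9 ≤ puzzle.length ∧ ∀ row ∈ puzzle.take 9, 9 ≤ row.length) ∨
  (∃ i < min 9 puzzle.length,
    (∀ i' < i, 9 ≤ (puzzle.getD i' []).length) ∧
    ∃ j2 < min 9 (puzzle.getD i []).length, ∃ j1 < j2,
      (puzzle.getD i []).getD j1 "" = (puzzle.getD i []).getD j2 "" ∧
      (puzzle.getD i []).getD j1 "" ≠ ".")
instance (puzzle : List (List String)) : Decidable (Pre_isValidWordku puzzle) := by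
  unfold Pre_isValidWordku; infer_instance

def pvWitness_isValidWordku : List (List String) :=
  List.replicate 9 (List.replicate 9 ".")

def Spec_isValidWordku (puzzle : List (List String)) (out : Bool) : Prop := out = isValidWordku_alt puzzle
instance (puzzle : List (List String)) (out : Bool) : Decidable (Spec_isValidWordku puzzle out) := by unfold Spec_isValidWordku; infer_instance

-- ===== CLAIM (what is proved, stated in full; the proofs are below) =====
def Claim_equal_isValidWordku : Prop := ∀ (puzzle : List (List String)), Dom_isValidWordku puzzle → Pre_isValidWordku puzzle → Spec_isValidWordku puzzle (isValidWordku puzzle)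

-- ===== LEMMAS AND PROOFS =====

-- A's dict scan succeeds iff the non-'.' entries are distinct and none is already in the dict
theorem scanA_true_iff (l : List String) (d : PySem.Dict String Bool) :
    scanA l d = true ↔ ((l.filter (fun x => !(x == "."))).Nodup
      ∧ ∀ x ∈ l.filter (fun x => !(x == ".")), d.contains x = false) := by
  induction l generalizing d with
  | nil => simp [scanA]
  | cons x xs ih =>
    by_cases hx : x == "."
    · simpa [scanA, hx, List.filter_cons] using ih d
    · by_cases hc : d.contains x
      · simp only [scanA, hx, hc, if_false, Bool.false_eq_true, List.filter_cons]
        simp only [Bool.not_eq_true] at hx ⊢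
        constructor
        · intro h; exact absurd h (by simp)
        · rintro ⟨-, hall⟩
          have := hall x (by simp [List.mem_filter, hx])
          rw [hc] at this; exact absurd this (by simp)
      · simp only [scanA, hx, hc, if_false, Bool.false_eq_true, List.filter_cons]
        rw [ih]
        have hcf : d.contains x = false := by simpa using hc
        constructor
        · rintro ⟨hnd, hall⟩
          have hxmem : x ∉ xs.filter (fun x => !(x == ".")) := by
            intro hm
            have := hall x hm
            simp at this
          refine ⟨by simp [List.nodup_cons, hxmem, hnd], ?_⟩
          intro y hy
          rcases List.mem_cons.mp hy with rfl | hy'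
          · exact hcf
          · have := hall y hy'
            simp [PySem.Dict.contains_insert] at this
            exact this.2
        · rintro ⟨hnd, hall⟩
          have hxmem : x ∉ xs.filter (fun x => !(x == ".")) := (List.nodup_cons.mp (by simpa using hnd)).1
          refine ⟨(List.nodup_cons.mp (by simpa using hnd)).2, ?_⟩
          intro y hy
          rw [PySem.Dict.contains_insert]
          have hyx : ¬ (y == x) = true := by
            intro hbe
            exact hxmem (by rwa [eq_of_beq hbe] at hy)
          simp [hyx, hall y (List.mem_cons_of_mem _ hy)]

@[simp] theorem scanA_empty_iff (l : List String) :
    scanA l PySem.Dict.empty = true ↔ (l.filter (fun x => !(x == "."))).Nodup := by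
  rw [scanA_true_iff]
  simp [PySem.Dict.contains_empty]

-- B-side characterisation machinery: the non-'.' values of the cells of cs lying in unit k of
-- the classification f (row index, column index, or box index)
def bix (p : Int × Int) : Int := PySem.Int.floordiv p.1 3 * 3 + PySem.Int.floordiv p.2 3

def clsVals (puzzle : List (List String)) (f : Int × Int → Int) (cs : List (Int × Int)) (k : Int) :
    List String :=
  ((cs.filter (fun p => f p == k)).map (fun p => cellAt puzzle p.1 p.2)).filter (fun c => !(c == "."))

-- the loop invariant for one unit: its values so far are distinct and disjoint from its set
def Pgood (vals : List String) (s : PySem.Set String) : Prop :=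
  vals.Nodup ∧ ∀ v ∈ vals, v ∉ s

theorem clsVals_cons_dot (puzzle : List (List String)) (f : Int × Int → Int)
    (p : Int × Int) (cs : List (Int × Int)) (k : Int)
    (h : cellAt puzzle p.1 p.2 = ".") :
    clsVals puzzle f (p :: cs) k = clsVals puzzle f cs k := by
  unfold clsVals
  rw [List.filter_cons]
  split
  · simp [h]
  · rfl

theorem clsVals_cons_eq (puzzle : List (List String)) (f : Int × Int → Int)
    (p : Int × Int) (cs : List (Int × Int)) (k : Int)
    (h : ¬ cellAt puzzle p.1 p.2 = ".") (hk : f p = k) :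
    clsVals puzzle f (p :: cs) k = cellAt puzzle p.1 p.2 :: clsVals puzzle f cs k := by
  unfold clsVals
  rw [List.filter_cons]
  simp [hk, h]

theorem clsVals_cons_ne (puzzle : List (List String)) (f : Int × Int → Int)
    (p : Int × Int) (cs : List (Int × Int)) (k : Int) (hk : ¬ f p = k) :
    clsVals puzzle f (p :: cs) k = clsVals puzzle f cs k := by
  unfold clsVals
  rw [List.filter_cons]
  simp [hk]

theorem Pgood_step (c : String) (vals : List String) (s : PySem.Set String) (h : c ∉ s) :
    Pgood (c :: vals) s ↔ Pgood vals (PySem.Set.add s c) := by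
  unfold Pgood
  simp only [List.nodup_cons, List.mem_cons, PySem.Set.mem_add]
  constructor
  · rintro ⟨⟨hcv, hnd⟩, hall⟩
    refine ⟨hnd, fun v hv => ?_⟩
    rintro (hvs | rfl)
    · exact hall v (Or.inr hv) hvs
    · exact hcv hv
  · rintro ⟨hnd, hall⟩
    refine ⟨⟨fun hc => (hall c hc) (Or.inr rfl), hnd⟩, ?_⟩
    rintro v (rfl | hv) hvs
    · exact h hvs
    · exact hall v hv (Or.inl hvs)

theorem Pgood_cons_fail (c : String) (vals : List String) (s : PySem.Set String) (h : c ∈ s) :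
    ¬ Pgood (c :: vals) s := by
  rintro ⟨-, hall⟩
  exact hall c (List.mem_cons_self) h

-- the single-pass invariant: the loop succeeds iff, for every unit, the values contributed by
-- the remaining cells are distinct and none is already recorded in that unit's set
theorem loopB_true_iff (puzzle : List (List String)) (cs : List (Int × Int)) :
    ∀ (rows cols boxes : Int → PySem.Set String),
      loopB puzzle cs rows cols boxes = true ↔
        ∀ k : Int, Pgood (clsVals puzzle (fun p => p.1) cs k) (rows k)
          ∧ Pgood (clsVals puzzle (fun p => p.2) cs k) (cols k)
          ∧ Pgood (clsVals puzzle bix cs k) (boxes k) := by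
  induction cs with
  | nil => intro rows cols boxes; simp [loopB, clsVals, Pgood]
  | cons p cs ih =>
    obtain ⟨i, j⟩ := p
    intro rows cols boxes
    by_cases hdot : cellAt puzzle i j == "."
    · have hd : cellAt puzzle i j = "." := by simpa using hdot
      simp only [loopB, hdot, if_true]
      rw [ih]
      apply forall_congr'
      intro k
      rw [clsVals_cons_dot _ _ _ _ _ hd, clsVals_cons_dot _ _ _ _ _ hd, clsVals_cons_dot _ _ _ _ _ hd]
    · have hd : ¬ cellAt puzzle i j = "." := by simpa using hdot
      by_cases hhit : (PySem.Set.contains (rows i) (cellAt puzzle i j)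
          || PySem.Set.contains (cols j) (cellAt puzzle i j)
          || PySem.Set.contains (boxes (PySem.Int.floordiv i 3 * 3 + PySem.Int.floordiv j 3)) (cellAt puzzle i j)) = true
      · simp only [loopB, hdot, if_false, hhit, if_true, Bool.false_eq_true, false_iff]
        intro hall
        rcases Bool.or_eq_true_iff.mp hhit with hro | hbx
        · rcases Bool.or_eq_true_iff.mp hro with hr | hc
          · exact Pgood_cons_fail _ _ _ ((PySem.Set.contains_iff _ _).mp hr)
              (by rw [← clsVals_cons_eq puzzle (fun p => p.1) (i, j) cs i hd rfl]; exact (hall i).1)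
          · exact Pgood_cons_fail _ _ _ ((PySem.Set.contains_iff _ _).mp hc)
              (by rw [← clsVals_cons_eq puzzle (fun p => p.2) (i, j) cs j hd rfl]; exact (hall j).2.1)
        · exact Pgood_cons_fail _ _ _ ((PySem.Set.contains_iff _ _).mp hbx)
            (by rw [← clsVals_cons_eq puzzle bix (i, j) cs _ hd rfl]
                exact (hall (PySem.Int.floordiv i 3 * 3 + PySem.Int.floordiv j 3)).2.2)
      · have hhit' : ¬ ((rows i).contains (cellAt puzzle i j) = true
            ∨ (cols j).contains (cellAt puzzle i j) = true
            ∨ (boxes (PySem.Int.floordiv i 3 * 3 + PySem.Int.floordiv j 3)).contains (cellAt puzzle i j) = true) := by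
          intro hor
          apply hhit
          simp only [Bool.or_eq_true]
          tauto
        have hr : cellAt puzzle i j ∉ rows i := fun hm =>
          hhit' (Or.inl ((PySem.Set.contains_iff _ _).mpr hm))
        have hc : cellAt puzzle i j ∉ cols j := fun hm =>
          hhit' (Or.inr (Or.inl ((PySem.Set.contains_iff _ _).mpr hm)))
        have hb : cellAt puzzle i j ∉ boxes (PySem.Int.floordiv i 3 * 3 + PySem.Int.floordiv j 3) := fun hm =>
          hhit' (Or.inr (Or.inr ((PySem.Set.contains_iff _ _).mpr hm)))
        simp only [loopB, hdot, hhit, Bool.false_eq_true, if_false]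
        rw [ih]
        apply forall_congr'
        intro k
        have hbixp : bix (i, j) = PySem.Int.floordiv i 3 * 3 + PySem.Int.floordiv j 3 := rfl
        apply and_congr
        · by_cases hk : k = i
          · rw [hk, clsVals_cons_eq puzzle (fun p => p.1) (i, j) cs i hd rfl, if_pos rfl]
            exact (Pgood_step _ _ _ hr).symm
          · rw [clsVals_cons_ne puzzle (fun p => p.1) (i, j) cs k (fun h => hk h.symm), if_neg hk]
        · apply and_congr
          · by_cases hk : k = j
            · rw [hk, clsVals_cons_eq puzzle (fun p => p.2) (i, j) cs j hd rfl, if_pos rfl]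
              exact (Pgood_step _ _ _ hc).symm
            · rw [clsVals_cons_ne puzzle (fun p => p.2) (i, j) cs k (fun h => hk h.symm), if_neg hk]
          · by_cases hk : k = PySem.Int.floordiv i 3 * 3 + PySem.Int.floordiv j 3
            · rw [hk, clsVals_cons_eq puzzle bix (i, j) cs _ hd hbixp, if_pos rfl]
              exact (Pgood_step _ _ _ hb).symm
            · rw [clsVals_cons_ne puzzle bix (i, j) cs k (fun h => hk (hbixp ▸ h.symm)), if_neg hk]

theorem altB_true_iff (puzzle : List (List String)) :
    isValidWordku_alt puzzle = true ↔
      ∀ k : Int, (clsVals puzzle (fun p => p.1) cells81 k).Nodup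
        ∧ (clsVals puzzle (fun p => p.2) cells81 k).Nodup
        ∧ (clsVals puzzle bix cells81 k).Nodup := by
  unfold isValidWordku_alt
  rw [loopB_true_iff]
  apply forall_congr'
  intro k
  simp [Pgood, PySem.Set.empty]

set_option maxHeartbeats 2000000 in
theorem main_eq (puzzle : List (List String)) :
    isValidWordku puzzle = isValidWordku_alt puzzle := by
  have hr9 : PySem.List.pyRange 0 9 1 = [0,1,2,3,4,5,6,7,8] := by decide
  have hr3 : PySem.List.pyRange 0 9 3 = [0,3,6] := by decide
  have hb03 : PySem.List.pyRange 0 (0 + 3) 1 = [0,1,2] := by decide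
  have hb36 : PySem.List.pyRange 3 (3 + 3) 1 = [3,4,5] := by decide
  have hb69 : PySem.List.pyRange 6 (6 + 3) 1 = [6,7,8] := by decide
  -- the classes partition cells81 into indices 0..8, so the ∀ k collapses to nine instances
  have hbnd : ∀ p ∈ cells81, (0 ≤ p.1 ∧ p.1 < 9) ∧ (0 ≤ p.2 ∧ p.2 < 9) ∧ (0 ≤ bix p ∧ bix p < 9) := by decide
  have hout : ∀ (f : Int × Int → Int), (∀ p ∈ cells81, 0 ≤ f p ∧ f p < 9) →
      ∀ k : Int, (k < 0 ∨ 8 < k) → clsVals puzzle f cells81 k = [] := by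
    intro f hf k hk
    unfold clsVals
    have hnil : cells81.filter (fun p => f p == k) = [] := by
      rw [List.filter_eq_nil_iff]
      intro p hp
      have := hf p hp
      simp only [beq_iff_eq]
      omega
    rw [hnil, List.map_nil, List.filter_nil]
  have hQ : (∀ k : Int, (clsVals puzzle (fun p => p.1) cells81 k).Nodup
        ∧ (clsVals puzzle (fun p => p.2) cells81 k).Nodup
        ∧ (clsVals puzzle bix cells81 k).Nodup) ↔
      ((∀ k ∈ ([0,1,2,3,4,5,6,7,8] : List Int),
        (clsVals puzzle (fun p => p.1) cells81 k).Nodup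
        ∧ (clsVals puzzle (fun p => p.2) cells81 k).Nodup
        ∧ (clsVals puzzle bix cells81 k).Nodup)) := by
    constructor
    · intro h k _; exact h k
    · intro h k
      by_cases hk : 0 ≤ k ∧ k < 9
      · apply h
        simp only [List.mem_cons]
        omega
      · have hk' : k < 0 ∨ 8 < k := by omega
        refine ⟨?_, ?_, ?_⟩
        · rw [hout (fun p => p.1) (fun p hp => (hbnd p hp).1) k hk']; exact List.nodup_nil
        · rw [hout (fun p => p.2) (fun p hp => (hbnd p hp).2.1) k hk']; exact List.nodup_nil
        · rw [hout bix (fun p hp => (hbnd p hp).2.2) k hk']; exact List.nodup_nil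
  rw [Bool.eq_iff_iff, altB_true_iff, hQ]
  simp only [isValidWordku, hr9, hr3, hb03, hb36, hb69,
    List.all_cons, List.all_nil, List.map_cons, List.map_nil,
    List.flatMap_cons, List.flatMap_nil, List.append_nil, List.cons_append, List.nil_append,
    Bool.and_eq_true, Bool.and_true,
    scanA_empty_iff]
  have hrowc0 : cells81.filter (fun p => p.1 == (0 : Int)) = [((0 : Int), (0 : Int)), ((0 : Int), (1 : Int)), ((0 : Int), (2 : Int)), ((0 : Int), (3 : Int)), ((0 : Int), (4 : Int)), ((0 : Int), (5 : Int)), ((0 : Int), (6 : Int)), ((0 : Int), (7 : Int)), ((0 : Int), (8 : Int))] := by decide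
  have hcolc0 : cells81.filter (fun p => p.2 == (0 : Int)) = [((0 : Int), (0 : Int)), ((1 : Int), (0 : Int)), ((2 : Int), (0 : Int)), ((3 : Int), (0 : Int)), ((4 : Int), (0 : Int)), ((5 : Int), (0 : Int)), ((6 : Int), (0 : Int)), ((7 : Int), (0 : Int)), ((8 : Int), (0 : Int))] := by decide
  have hboxc0 : cells81.filter (fun p => bix p == (0 : Int)) = [((0 : Int), (0 : Int)), ((0 : Int), (1 : Int)), ((0 : Int), (2 : Int)), ((1 : Int), (0 : Int)), ((1 : Int), (1 : Int)), ((1 : Int), (2 : Int)), ((2 : Int), (0 : Int)), ((2 : Int), (1 : Int)), ((2 : Int), (2 : Int))] := by decide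
  have hrowc1 : cells81.filter (fun p => p.1 == (1 : Int)) = [((1 : Int), (0 : Int)), ((1 : Int), (1 : Int)), ((1 : Int), (2 : Int)), ((1 : Int), (3 : Int)), ((1 : Int), (4 : Int)), ((1 : Int), (5 : Int)), ((1 : Int), (6 : Int)), ((1 : Int), (7 : Int)), ((1 : Int), (8 : Int))] := by decide
  have hcolc1 : cells81.filter (fun p => p.2 == (1 : Int)) = [((0 : Int), (1 : Int)), ((1 : Int), (1 : Int)), ((2 : Int), (1 : Int)), ((3 : Int), (1 : Int)), ((4 : Int), (1 : Int)), ((5 : Int), (1 : Int)), ((6 : Int), (1 : Int)), ((7 : Int), (1 : Int)), ((8 : Int), (1 : Int))] := by decide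
  have hboxc1 : cells81.filter (fun p => bix p == (1 : Int)) = [((0 : Int), (3 : Int)), ((0 : Int), (4 : Int)), ((0 : Int), (5 : Int)), ((1 : Int), (3 : Int)), ((1 : Int), (4 : Int)), ((1 : Int), (5 : Int)), ((2 : Int), (3 : Int)), ((2 : Int), (4 : Int)), ((2 : Int), (5 : Int))] := by decide
  have hrowc2 : cells81.filter (fun p => p.1 == (2 : Int)) = [((2 : Int), (0 : Int)), ((2 : Int), (1 : Int)), ((2 : Int), (2 : Int)), ((2 : Int), (3 : Int)), ((2 : Int), (4 : Int)), ((2 : Int), (5 : Int)), ((2 : Int), (6 : Int)), ((2 : Int), (7 : Int)), ((2 : Int), (8 : Int))] := by decide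
  have hcolc2 : cells81.filter (fun p => p.2 == (2 : Int)) = [((0 : Int), (2 : Int)), ((1 : Int), (2 : Int)), ((2 : Int), (2 : Int)), ((3 : Int), (2 : Int)), ((4 : Int), (2 : Int)), ((5 : Int), (2 : Int)), ((6 : Int), (2 : Int)), ((7 : Int), (2 : Int)), ((8 : Int), (2 : Int))] := by decide
  have hboxc2 : cells81.filter (fun p => bix p == (2 : Int)) = [((0 : Int), (6 : Int)), ((0 : Int), (7 : Int)), ((0 : Int), (8 : Int)), ((1 : Int), (6 : Int)), ((1 : Int), (7 : Int)), ((1 : Int), (8 : Int)), ((2 : Int), (6 : Int)), ((2 : Int), (7 : Int)), ((2 : Int), (8 : Int))] := by decide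
  have hrowc3 : cells81.filter (fun p => p.1 == (3 : Int)) = [((3 : Int), (0 : Int)), ((3 : Int), (1 : Int)), ((3 : Int), (2 : Int)), ((3 : Int), (3 : Int)), ((3 : Int), (4 : Int)), ((3 : Int), (5 : Int)), ((3 : Int), (6 : Int)), ((3 : Int), (7 : Int)), ((3 : Int), (8 : Int))] := by decide
  have hcolc3 : cells81.filter (fun p => p.2 == (3 : Int)) = [((0 : Int), (3 : Int)), ((1 : Int), (3 : Int)), ((2 : Int), (3 : Int)), ((3 : Int), (3 : Int)), ((4 : Int), (3 : Int)), ((5 : Int), (3 : Int)), ((6 : Int), (3 : Int)), ((7 : Int), (3 : Int)), ((8 : Int), (3 : Int))] := by decide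
  have hboxc3 : cells81.filter (fun p => bix p == (3 : Int)) = [((3 : Int), (0 : Int)), ((3 : Int), (1 : Int)), ((3 : Int), (2 : Int)), ((4 : Int), (0 : Int)), ((4 : Int), (1 : Int)), ((4 : Int), (2 : Int)), ((5 : Int), (0 : Int)), ((5 : Int), (1 : Int)), ((5 : Int), (2 : Int))] := by decide
  have hrowc4 : cells81.filter (fun p => p.1 == (4 : Int)) = [((4 : Int), (0 : Int)), ((4 : Int), (1 : Int)), ((4 : Int), (2 : Int)), ((4 : Int), (3 : Int)), ((4 : Int), (4 : Int)), ((4 : Int), (5 : Int)), ((4 : Int), (6 : Int)), ((4 : Int), (7 : Int)), ((4 : Int), (8 : Int))] := by decide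
  have hcolc4 : cells81.filter (fun p => p.2 == (4 : Int)) = [((0 : Int), (4 : Int)), ((1 : Int), (4 : Int)), ((2 : Int), (4 : Int)), ((3 : Int), (4 : Int)), ((4 : Int), (4 : Int)), ((5 : Int), (4 : Int)), ((6 : Int), (4 : Int)), ((7 : Int), (4 : Int)), ((8 : Int), (4 : Int))] := by decide
  have hboxc4 : cells81.filter (fun p => bix p == (4 : Int)) = [((3 : Int), (3 : Int)), ((3 : Int), (4 : Int)), ((3 : Int), (5 : Int)), ((4 : Int), (3 : Int)), ((4 : Int), (4 : Int)), ((4 : Int), (5 : Int)), ((5 : Int), (3 : Int)), ((5 : Int), (4 : Int)), ((5 : Int), (5 : Int))] := by decide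
  have hrowc5 : cells81.filter (fun p => p.1 == (5 : Int)) = [((5 : Int), (0 : Int)), ((5 : Int), (1 : Int)), ((5 : Int), (2 : Int)), ((5 : Int), (3 : Int)), ((5 : Int), (4 : Int)), ((5 : Int), (5 : Int)), ((5 : Int), (6 : Int)), ((5 : Int), (7 : Int)), ((5 : Int), (8 : Int))] := by decide
  have hcolc5 : cells81.filter (fun p => p.2 == (5 : Int)) = [((0 : Int), (5 : Int)), ((1 : Int), (5 : Int)), ((2 : Int), (5 : Int)), ((3 : Int), (5 : Int)), ((4 : Int), (5 : Int)), ((5 : Int), (5 : Int)), ((6 : Int), (5 : Int)), ((7 : Int), (5 : Int)), ((8 : Int), (5 : Int))] := by decide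
  have hboxc5 : cells81.filter (fun p => bix p == (5 : Int)) = [((3 : Int), (6 : Int)), ((3 : Int), (7 : Int)), ((3 : Int), (8 : Int)), ((4 : Int), (6 : Int)), ((4 : Int), (7 : Int)), ((4 : Int), (8 : Int)), ((5 : Int), (6 : Int)), ((5 : Int), (7 : Int)), ((5 : Int), (8 : Int))] := by decide
  have hrowc6 : cells81.filter (fun p => p.1 == (6 : Int)) = [((6 : Int), (0 : Int)), ((6 : Int), (1 : Int)), ((6 : Int), (2 : Int)), ((6 : Int), (3 : Int)), ((6 : Int), (4 : Int)), ((6 : Int), (5 : Int)), ((6 : Int), (6 : Int)), ((6 : Int), (7 : Int)), ((6 : Int), (8 : Int))] := by decide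
  have hcolc6 : cells81.filter (fun p => p.2 == (6 : Int)) = [((0 : Int), (6 : Int)), ((1 : Int), (6 : Int)), ((2 : Int), (6 : Int)), ((3 : Int), (6 : Int)), ((4 : Int), (6 : Int)), ((5 : Int), (6 : Int)), ((6 : Int), (6 : Int)), ((7 : Int), (6 : Int)), ((8 : Int), (6 : Int))] := by decide
  have hboxc6 : cells81.filter (fun p => bix p == (6 : Int)) = [((6 : Int), (0 : Int)), ((6 : Int), (1 : Int)), ((6 : Int), (2 : Int)), ((7 : Int), (0 : Int)), ((7 : Int), (1 : Int)), ((7 : Int), (2 : Int)), ((8 : Int), (0 : Int)), ((8 : Int), (1 : Int)), ((8 : Int), (2 : Int))] := by decide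
  have hrowc7 : cells81.filter (fun p => p.1 == (7 : Int)) = [((7 : Int), (0 : Int)), ((7 : Int), (1 : Int)), ((7 : Int), (2 : Int)), ((7 : Int), (3 : Int)), ((7 : Int), (4 : Int)), ((7 : Int), (5 : Int)), ((7 : Int), (6 : Int)), ((7 : Int), (7 : Int)), ((7 : Int), (8 : Int))] := by decide
  have hcolc7 : cells81.filter (fun p => p.2 == (7 : Int)) = [((0 : Int), (7 : Int)), ((1 : Int), (7 : Int)), ((2 : Int), (7 : Int)), ((3 : Int), (7 : Int)), ((4 : Int), (7 : Int)), ((5 : Int), (7 : Int)), ((6 : Int), (7 : Int)), ((7 : Int), (7 : Int)), ((8 : Int), (7 : Int))] := by decide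
  have hboxc7 : cells81.filter (fun p => bix p == (7 : Int)) = [((6 : Int), (3 : Int)), ((6 : Int), (4 : Int)), ((6 : Int), (5 : Int)), ((7 : Int), (3 : Int)), ((7 : Int), (4 : Int)), ((7 : Int), (5 : Int)), ((8 : Int), (3 : Int)), ((8 : Int), (4 : Int)), ((8 : Int), (5 : Int))] := by decide
  have hrowc8 : cells81.filter (fun p => p.1 == (8 : Int)) = [((8 : Int), (0 : Int)), ((8 : Int), (1 : Int)), ((8 : Int), (2 : Int)), ((8 : Int), (3 : Int)), ((8 : Int), (4 : Int)), ((8 : Int), (5 : Int)), ((8 : Int), (6 : Int)), ((8 : Int), (7 : Int)), ((8 : Int), (8 : Int))] := by decide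
  have hcolc8 : cells81.filter (fun p => p.2 == (8 : Int)) = [((0 : Int), (8 : Int)), ((1 : Int), (8 : Int)), ((2 : Int), (8 : Int)), ((3 : Int), (8 : Int)), ((4 : Int), (8 : Int)), ((5 : Int), (8 : Int)), ((6 : Int), (8 : Int)), ((7 : Int), (8 : Int)), ((8 : Int), (8 : Int))] := by decide
  have hboxc8 : cells81.filter (fun p => bix p == (8 : Int)) = [((6 : Int), (6 : Int)), ((6 : Int), (7 : Int)), ((6 : Int), (8 : Int)), ((7 : Int), (6 : Int)), ((7 : Int), (7 : Int)), ((7 : Int), (8 : Int)), ((8 : Int), (6 : Int)), ((8 : Int), (7 : Int)), ((8 : Int), (8 : Int))] := by decide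
  simp only [List.forall_mem_cons, clsVals,
    hrowc0, hcolc0, hboxc0, hrowc1, hcolc1, hboxc1, hrowc2, hcolc2, hboxc2, hrowc3, hcolc3, hboxc3, hrowc4, hcolc4, hboxc4, hrowc5, hcolc5, hboxc5, hrowc6, hcolc6, hboxc6, hrowc7, hcolc7, hboxc7, hrowc8, hcolc8, hboxc8,
    List.map_cons, List.map_nil]
  norm_num
  constructor
  · rintro ⟨⟨⟨r0,r1,r2,r3,r4,r5,r6,r7,r8⟩, ⟨c0,c1,c2,c3,c4,c5,c6,c7,c8⟩⟩,
      ⟨b0,b3,b6⟩, ⟨b1,b4,b7⟩, b2, b5, b8⟩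
    exact ⟨⟨r0,c0,b0⟩,⟨r1,c1,b1⟩,⟨r2,c2,b2⟩,⟨r3,c3,b3⟩,⟨r4,c4,b4⟩,⟨r5,c5,b5⟩,
      ⟨r6,c6,b6⟩,⟨r7,c7,b7⟩,⟨r8,c8,b8⟩⟩
  · rintro ⟨⟨r0,c0,b0⟩,⟨r1,c1,b1⟩,⟨r2,c2,b2⟩,⟨r3,c3,b3⟩,⟨r4,c4,b4⟩,⟨r5,c5,b5⟩,
      ⟨r6,c6,b6⟩,⟨r7,c7,b7⟩,⟨r8,c8,b8⟩⟩
    exact ⟨⟨⟨r0,r1,r2,r3,r4,r5,r6,r7,r8⟩, ⟨c0,c1,c2,c3,c4,c5,c6,c7,c8⟩⟩,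
      ⟨b0,b3,b6⟩, ⟨b1,b4,b7⟩, b2, b5, b8⟩

-- ===== VERDICT (by name: the statement is the Claim_ definition above) =====
theorem isValidWordku_spec : Claim_equal_isValidWordku := by
  intro puzzle _ _
  unfold Spec_isValidWordku
  exact main_eq puzzle
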